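-- pv_equiv track=rewrite | github.com/RainbowDragon/ACSL | Python/Contest 3/2023 - 2024/ACSLRackOIntermediate.py | get_rack_value1
-- ===== SOURCE A (Python) =====
-- def get_rack_value1(rack_list):
--
--     result = rack_list[0]
--     count = 0
--     in_sequence = False
--
--     for k in range(1, len(rack_list)):
--         result += rack_list[k]
--
--         if rack_list[k] - rack_list[k-1] == 1:
--             if in_sequence:
--                 count += 1
--             else:
--                 count += 2
--             in_sequence = True
--         else:
--             if count >= 3:
--                 result += count * 5
--             in_sequence = False
--             count = 0
--
--     if count >= 3:
--         result += count * 5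
--
--     return result
-- ===== SOURCE B (Python) =====
-- def get_rack_value1(rack_list):
--     total = sum(rack_list)
--     i, n = 0, len(rack_list)
--     while i < n:
--         j = i + 1
--         while j < n and rack_list[j] - rack_list[j - 1] == 1:
--             j += 1
--         if j - i >= 3:
--             total += (j - i) * 5
--         i = j
--     return total
-- ===== Notes on version B (the rewrite author's own statement) =====
-- stated objective: idiomatic
-- what changed: Replaces the flag/counter state machine (result accumulated element by element with in_sequence/count bookkeeping) by sum(rack_list) up front plus a run-length scan: an inner loop advances j to the end of each maximal consecutive run and adds the 5-per-element bonus when the run has length >= 3.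
-- crash fix: On the empty list A raises IndexError at its initial first-element access; B returns 0, the empty sum. — e.g. on get_rack_value1([]): A raises IndexError, B returns 0
import Mathlib
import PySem

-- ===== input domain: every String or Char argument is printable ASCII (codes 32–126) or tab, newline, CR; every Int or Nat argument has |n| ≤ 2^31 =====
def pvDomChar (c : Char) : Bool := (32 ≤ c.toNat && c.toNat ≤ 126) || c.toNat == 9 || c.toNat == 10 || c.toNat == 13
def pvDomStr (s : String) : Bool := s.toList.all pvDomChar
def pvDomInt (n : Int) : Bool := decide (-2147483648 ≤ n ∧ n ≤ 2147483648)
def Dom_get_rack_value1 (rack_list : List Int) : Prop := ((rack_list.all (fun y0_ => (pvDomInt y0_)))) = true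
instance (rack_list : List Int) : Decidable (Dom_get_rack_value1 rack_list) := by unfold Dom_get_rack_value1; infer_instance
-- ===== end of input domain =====

-- B replaces A's element-by-element accumulation with flag/counter bookkeeping by sum(rack_list)
-- up front plus a nested run-length scan over maximal consecutive runs (objective: idiomatic).

-- ===== PORT A =====
-- one iteration of A's for-loop body, state = (result, count, in_sequence)
def pvAStep (rack_list : List Int) (st : Int × Int × Bool) (k : Int) : Int × Int × Bool :=
  let result := st.1 + PySem.List.pyGetD rack_list k 0
  if PySem.List.pyGetD rack_list k 0 - PySem.List.pyGetD rack_list (k - 1) 0 = 1 then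
    (result, (if st.2.2 then st.2.1 + 1 else st.2.1 + 2), true)
  else
    ((if st.2.1 ≥ 3 then result + st.2.1 * 5 else result), 0, false)

def get_rack_value1 (rack_list : List Int) : Int :=
  let st := (PySem.List.pyRange 1 rack_list.length 1).foldl (pvAStep rack_list)
    (PySem.List.pyGetD rack_list 0 0, 0, false)
  if st.2.1 ≥ 3 then st.1 + st.2.1 * 5 else st.1

-- ===== PORT B =====
-- inner while loop of B: advance j to the end of the maximal consecutive run
def pvBInner (rack_list : List Int) (j : Nat) : Nat :=
  if h : j < rack_list.length ∧
      PySem.List.pyGetD rack_list (j : Int) 0 - PySem.List.pyGetD rack_list ((j : Int) - 1) 0 = 1 then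
    pvBInner rack_list (j + 1)
  else j
termination_by rack_list.length - j

-- cited by pvBOuter's decreasing_by
lemma pvBInner_ge (rack_list : List Int) (j : Nat) : j ≤ pvBInner rack_list j := by
  rw [pvBInner]
  split
  · exact le_trans (Nat.le_succ j) (pvBInner_ge rack_list (j + 1))
  · exact le_refl j
termination_by rack_list.length - j

-- outer while loop of B
def pvBOuter (rack_list : List Int) (i : Nat) (total : Int) : Int :=
  if h : i < rack_list.length then
    let j := pvBInner rack_list (i + 1)
    pvBOuter rack_list j (if j - i ≥ 3 then total + ((j - i : Nat) : Int) * 5 else total)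
  else total
termination_by rack_list.length - i
decreasing_by have := pvBInner_ge rack_list (i + 1); omega

def get_rack_value1_alt (rack_list : List Int) : Int :=
  pvBOuter rack_list 0 rack_list.sum

-- ===== PRECONDITION & SPEC =====
-- Pre_ excludes only the empty list, on which A raises IndexError at its initial first-element access.
def Pre_get_rack_value1 (rack_list : List Int) : Prop := rack_list ≠ []
instance (rack_list : List Int) : Decidable (Pre_get_rack_value1 rack_list) := by
  unfold Pre_get_rack_value1; infer_instance

def pvWitness_get_rack_value1 : List Int := [4, 5, 6, 2]

-- On the empty list A raises IndexError at its initial first-element access; B returns 0, the empty sum.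
def Raises_get_rack_value1 (rack_list : List Int) : Prop := rack_list = []
instance (rack_list : List Int) : Decidable (Raises_get_rack_value1 rack_list) := by
  unfold Raises_get_rack_value1; infer_instance
def pvRaiseWitness_get_rack_value1 : List Int := []
def pvRaiseWitnessOut_get_rack_value1 : Int := 0

def Spec_get_rack_value1 (rack_list : List Int) (out : Int) : Prop := out = get_rack_value1_alt rack_list
instance (rack_list : List Int) (out : Int) : Decidable (Spec_get_rack_value1 rack_list out) := by
  unfold Spec_get_rack_value1; infer_instance

-- ===== CLAIM (what is proved, stated in full; the proofs are below) =====
def Claim_equal_get_rack_value1 : Prop := ∀ (rack_list : List Int), Dom_get_rack_value1 rack_list → Pre_get_rack_value1 rack_list → Spec_get_rack_value1 rack_list (get_rack_value1 rack_list)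

def Claim_raises_get_rack_value1 : Prop := (∀ (rack_list : List Int), Dom_get_rack_value1 rack_list → Raises_get_rack_value1 rack_list → ¬ Pre_get_rack_value1 rack_list) ∧ (Dom_get_rack_value1 (pvRaiseWitness_get_rack_value1) ∧ Raises_get_rack_value1 (pvRaiseWitness_get_rack_value1) ∧ get_rack_value1_alt (pvRaiseWitness_get_rack_value1) = pvRaiseWitnessOut_get_rack_value1)

-- ===== LEMMAS AND PROOFS =====

-- A's loop as an index recursion (proof vehicle for the foldl over pyRange)
def pvALoop (rl : List Int) (k : Nat) (st : Int × Int × Bool) : Int × Int × Bool :=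
  if k < rl.length then pvALoop rl (k + 1) (pvAStep rl st (k : Int)) else st
termination_by rl.length - k

-- A's final bonus check
def pvFin (st : Int × Int × Bool) : Int := if st.2.1 ≥ 3 then st.1 + st.2.1 * 5 else st.1

lemma pvALoop_eq_foldl (rl : List Int) (k : Nat) (st : Int × Int × Bool) :
    (PySem.List.pyRange (k : Int) (rl.length : Int) 1).foldl (pvAStep rl) st = pvALoop rl k st := by
  rw [pvALoop]
  by_cases hk : k < rl.length
  · rw [PySem.List.pyRange_one_cons (by exact_mod_cast hk)]
    simp only [List.foldl_cons]
    have h1 : ((k : Int) + 1) = (((k + 1 : Nat)) : Int) := by push_cast; ring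
    rw [h1, pvALoop_eq_foldl rl (k + 1)]
    simp [hk]
  · rw [PySem.List.pyRange_one_eq_nil (by exact_mod_cast Nat.le_of_not_lt hk)]
    simp [hk]
termination_by rl.length - k

lemma pvBInner_le (rl : List Int) (j : Nat) (h : j ≤ rl.length) : pvBInner rl j ≤ rl.length := by
  rw [pvBInner]
  split
  · exact pvBInner_le rl (j + 1) (by omega)
  · exact h
termination_by rl.length - j

lemma pvBInner_stop (rl : List Int) (j : Nat) :
    ¬ (pvBInner rl j < rl.length ∧
      PySem.List.pyGetD rl ((pvBInner rl j : Nat) : Int) 0 -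
        PySem.List.pyGetD rl (((pvBInner rl j : Nat) : Int) - 1) 0 = 1) := by
  rw [pvBInner]
  split
  · exact pvBInner_stop rl (j + 1)
  · assumption
termination_by rl.length - j

-- splitting the suffix sum at any j between k and the end
lemma pvSum_split (rl : List Int) (k j : Nat) (hkj : k ≤ j) :
    ((rl.drop k).take (j - k)).sum + (rl.drop j).sum = (rl.drop k).sum := by
  have h1 : rl.drop j = (rl.drop k).drop (j - k) := by
    rw [List.drop_drop]; congr 1; omega
  rw [h1]
  rw [← List.sum_append, List.take_append_drop]

-- peeling one element off a suffix sum
lemma pvSum_cons (rl : List Int) (k : Nat) (hk : k < rl.length) :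
    (rl.drop k).sum = PySem.List.pyGetD rl (k : Int) 0 + (rl.drop (k + 1)).sum := by
  rw [List.drop_eq_getElem_cons hk, List.sum_cons]
  congr 1
  simp [PySem.List.pyGetD_natCast, List.getD_eq_getElem?_getD, hk]

-- the RUN lemma: while diffs are 1, A's loop adds the elements and counts the run
lemma pvRun (rl : List Int) (k : Nat) (r c : Int) :
    pvALoop rl k (r, c, true) =
      pvALoop rl (pvBInner rl k)
        (r + ((rl.drop k).take (pvBInner rl k - k)).sum,
         c + ((pvBInner rl k - k : Nat) : Int), true) := by
  rw [pvBInner]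
  split
  · next h =>
    obtain ⟨hk, hd⟩ := h
    rw [pvALoop]
    simp only [hk, if_true]
    rw [pvAStep]
    simp only [hd, if_true]
    rw [pvRun rl (k + 1) (r + PySem.List.pyGetD rl (k : Int) 0) (c + 1)]
    have hge := pvBInner_ge rl (k + 1)
    congr 1
    refine Prod.ext ?_ (Prod.ext ?_ rfl)
    · show r + PySem.List.pyGetD rl (k : Int) 0 + ((rl.drop (k + 1)).take (pvBInner rl (k + 1) - (k + 1))).sum
        = r + ((rl.drop k).take (pvBInner rl (k + 1) - k)).sum
      have hcons : rl.drop k = rl[k] :: rl.drop (k + 1) := List.drop_eq_getElem_cons hk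
      rw [hcons]
      have hsub : pvBInner rl (k + 1) - k = (pvBInner rl (k + 1) - (k + 1)) + 1 := by omega
      rw [hsub, List.take_succ_cons, List.sum_cons]
      have hget : PySem.List.pyGetD rl (k : Int) 0 = rl[k] := by
        simp [PySem.List.pyGetD_natCast, List.getD_eq_getElem?_getD, hk]
      rw [hget]; ring
    · show c + 1 + ((pvBInner rl (k + 1) - (k + 1) : Nat) : Int)
        = c + ((pvBInner rl (k + 1) - k : Nat) : Int)
      have : pvBInner rl (k + 1) - k = (pvBInner rl (k + 1) - (k + 1)) + 1 := by omega
      rw [this]; push_cast; ring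
  · simp
termination_by rl.length - k

-- the OUTER simulation: A's finished loop from index i+1 equals B's outer loop from i,
-- with B's total carrying the whole remaining suffix sum up front
lemma pvOuter (rl : List Int) (i : Nat) (r : Int) :
    pvFin (pvALoop rl (i + 1) (r, 0, false)) = pvBOuter rl i (r + (rl.drop (i + 1)).sum) := by
  rw [pvBOuter]
  by_cases hi : i < rl.length
  · rw [dif_pos hi]
    dsimp only
    by_cases hg : (i + 1) < rl.length ∧
        PySem.List.pyGetD rl ((i + 1 : Nat) : Int) 0 -
          PySem.List.pyGetD rl (((i + 1 : Nat) : Int) - 1) 0 = 1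
    · -- the run starting at i has length ≥ 2
      obtain ⟨hi1, hd1⟩ := hg
      have hbi : pvBInner rl (i + 1) = pvBInner rl (i + 2) := by
        rw [pvBInner]; simp only [hi1, hd1, and_self, dif_pos]
      set j := pvBInner rl (i + 1) with hj
      have hge : i + 2 ≤ j := by rw [hbi]; exact pvBInner_ge rl (i + 2)
      have hle : j ≤ rl.length := pvBInner_le rl (i + 1) (by omega)
      have hstop := pvBInner_stop rl (i + 1)
      rw [← hj] at hstop
      -- A: first step of the run
      rw [pvALoop]
      simp only [hi1, if_true]
      rw [pvAStep]
      simp only [hd1, if_true]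
      simp only [Bool.false_eq_true, if_false, zero_add]
      -- A: rest of the run
      rw [show ((i : Nat) + 1 + 1) = i + 2 from rfl] at *
      rw [pvRun rl (i + 2) (r + PySem.List.pyGetD rl ((i + 1 : Nat) : Int) 0) 2, ← hbi]
      have hcount : (2 : Int) + ((j - (i + 2) : Nat) : Int) = ((j - i : Nat) : Int) := by
        have : (j - i : Nat) = (j - (i + 2)) + 2 := by omega
        rw [this]; push_cast; ring
      have hsumrun : r + PySem.List.pyGetD rl ((i + 1 : Nat) : Int) 0
            + ((rl.drop (i + 2)).take (j - (i + 2))).sum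
          = r + ((rl.drop (i + 1)).take (j - (i + 1))).sum := by
        have hcons : rl.drop (i + 1) = rl[i + 1] :: rl.drop (i + 2) := List.drop_eq_getElem_cons hi1
        rw [hcons]
        have hsub : j - (i + 1) = (j - (i + 2)) + 1 := by omega
        rw [hsub, List.take_succ_cons, List.sum_cons]
        have hget : PySem.List.pyGetD rl ((i + 1 : Nat) : Int) 0 = rl[i + 1] := by
          rw [PySem.List.pyGetD_natCast]
          simp [List.getD_eq_getElem?_getD, hi1]
        rw [hget]; ring
      rw [hcount, hsumrun]
      set R : Int := r + ((rl.drop (i + 1)).take (j - (i + 1))).sum with hR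
      by_cases hjl : j < rl.length
      · -- run ends at a non-consecutive element a[j]
        have hdj : ¬ (PySem.List.pyGetD rl ((j : Nat) : Int) 0 -
            PySem.List.pyGetD rl (((j : Nat) : Int) - 1) 0 = 1) := by
          intro hc; exact hstop ⟨hjl, hc⟩
        rw [pvALoop]
        simp only [hjl, if_true]
        rw [pvAStep]
        simp only [hdj, if_false]
        rw [pvOuter rl j (if ((j - i : Nat) : Int) ≥ 3
              then R + PySem.List.pyGetD rl ((j : Nat) : Int) 0 + ((j - i : Nat) : Int) * 5
              else R + PySem.List.pyGetD rl ((j : Nat) : Int) 0)]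
        congr 1
        have hcond : (((j - i : Nat) : Int) ≥ 3) ↔ (j - i ≥ 3) := by
          constructor <;> intro h <;> [exact_mod_cast h; exact_mod_cast h]
        have hsuffix : ((rl.drop (i + 1)).take (j - (i + 1))).sum + (rl.drop j).sum
            = (rl.drop (i + 1)).sum := pvSum_split rl (i + 1) j (by omega)
        have hpeel : (rl.drop j).sum = PySem.List.pyGetD rl ((j : Nat) : Int) 0
            + (rl.drop (j + 1)).sum := pvSum_cons rl j hjl
        by_cases hb : j - i ≥ 3
        · rw [if_pos (hcond.mpr hb), if_pos hb, hR]
          have := hsuffix; rw [hpeel] at this; linarith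
        · rw [if_neg (fun hc => hb (hcond.mp hc)), if_neg hb, hR]
          have := hsuffix; rw [hpeel] at this; linarith
      · -- run reaches the end of the list: j = length
        have hjeq : j = rl.length := by omega
        rw [pvALoop]
        simp only [hjl, if_false]
        rw [pvBOuter]
        have hjl' : ¬ (j < rl.length) := hjl
        simp only [dif_neg hjl']
        rw [pvFin]
        have hcond : (((j - i : Nat) : Int) ≥ 3) ↔ (j - i ≥ 3) := by
          constructor <;> intro h <;> [exact_mod_cast h; exact_mod_cast h]
        have hdropj : rl.drop j = [] := by rw [hjeq]; simp
        have hsuffix : ((rl.drop (i + 1)).take (j - (i + 1))).sum + (rl.drop j).sum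
            = (rl.drop (i + 1)).sum := pvSum_split rl (i + 1) j (by omega)
        rw [hdropj, List.sum_nil, add_zero] at hsuffix
        by_cases hb : j - i ≥ 3
        · rw [if_pos (hcond.mpr hb), if_pos hb, hR]; linarith [hsuffix]
        · rw [if_neg (fun hc => hb (hcond.mp hc)), if_neg hb, hR]; linarith [hsuffix]
    · -- no run starts at i (or i is the last index): B's j = i+1, no bonus
      have hbi : pvBInner rl (i + 1) = i + 1 := by
        rw [pvBInner]; simp only [dif_neg hg]
      simp only [hbi]
      have hnb : ¬ (i + 1 - i ≥ 3) := by omega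
      rw [if_neg hnb]
      by_cases hi1 : i + 1 < rl.length
      · have hd1 : ¬ (PySem.List.pyGetD rl ((i + 1 : Nat) : Int) 0 -
            PySem.List.pyGetD rl (((i + 1 : Nat) : Int) - 1) 0 = 1) := fun hc => hg ⟨hi1, hc⟩
        rw [pvALoop]
        simp only [hi1, if_true]
        rw [pvAStep]
        simp only [hd1, if_false]
        have hz : ¬ ((0 : Int) ≥ 3) := by norm_num
        rw [if_neg hz]
        rw [show ((i : Nat) + 1 + 1) = (i + 1) + 1 from rfl]
        rw [pvOuter rl (i + 1) (r + PySem.List.pyGetD rl ((i + 1 : Nat) : Int) 0)]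
        congr 1
        have := pvSum_cons rl (i + 1) hi1
        linarith
      · -- i is the last index
        rw [pvALoop]
        simp only [hi1, if_false]
        rw [pvBOuter]
        simp only [dif_neg hi1]
        rw [pvFin]
        have hz : ¬ ((0 : Int) ≥ 3) := by norm_num
        rw [if_neg hz]
        have : rl.drop (i + 1) = [] := List.drop_eq_nil_of_le (by omega)
        rw [this, List.sum_nil, add_zero]
  · -- i ≥ length: both loops are finished
    simp only [dif_neg hi]
    rw [pvALoop]
    have : ¬ (i + 1 < rl.length) := by omega
    simp only [this, if_false]
    rw [pvFin]
    have hz : ¬ ((0 : Int) ≥ 3) := by norm_num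
    rw [if_neg hz]
    have : rl.drop (i + 1) = [] := List.drop_eq_nil_of_le (by omega)
    rw [this, List.sum_nil, add_zero]
termination_by rl.length - i
decreasing_by
  · have := pvBInner_ge rl (i + 2); omega
  · omega

-- ===== VERDICT (by name: the statement is the Claim_ definition above) =====
theorem get_rack_value1_spec : Claim_equal_get_rack_value1 := by
  intro rl _ hpre
  unfold Spec_get_rack_value1 get_rack_value1 get_rack_value1_alt
  dsimp only
  have key := pvALoop_eq_foldl rl 1 (PySem.List.pyGetD rl 0 0, 0, false)
  norm_num at key ⊢
  rw [key]
  show pvFin (pvALoop rl 1 (PySem.List.pyGetD rl 0 0, 0, false)) = pvBOuter rl 0 rl.sum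
  rw [show (1 : Nat) = 0 + 1 from rfl, pvOuter rl 0 (PySem.List.pyGetD rl 0 0)]
  congr 1
  obtain ⟨x, xs, rfl⟩ := List.exists_cons_of_ne_nil hpre
  simp [PySem.List.pyGetD_zero]

theorem get_rack_value1_raises : Claim_raises_get_rack_value1 := by
  unfold Claim_raises_get_rack_value1
  refine ⟨fun rl _ hr => by simp [Raises_get_rack_value1, Pre_get_rack_value1] at *; exact hr, ?_, ?_, ?_⟩
  · decide
  · rfl
  · unfold get_rack_value1_alt pvRaiseWitness_get_rack_value1 pvRaiseWitnessOut_get_rack_value1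
    rw [pvBOuter]; simp

-- self-check: the raise witness satisfies Raises_ and B's port returns the stated literal there
theorem pvRaiseWitnessCheck_ok :
    Raises_get_rack_value1 pvRaiseWitness_get_rack_value1 ∧
      get_rack_value1_alt pvRaiseWitness_get_rack_value1 = pvRaiseWitnessOut_get_rack_value1 :=
  ⟨get_rack_value1_raises.2.2.1, get_rack_value1_raises.2.2.2⟩
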